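-- pv_equiv track=rewrite | github.com/waechtjn/folder-color-switcher | caja-extensions/caja-folder-color-switcher.py | parse
-- ===== SOURCE A (Python) =====
-- COLORS = [
--             'Sand',
--             'Beige',
--             'Yellow',
--             'Orange',
--             'Brown',
--             'Red',
--             'Purple',
--             'Pink',
--             'Blue',
--             'Cyan',
--             'Aqua',
--             'Teal',
--             'Green',
--             'White',
--             'Grey',
--             'Black'
--            ]
--
-- def parse(theme_str):
--     base_name = theme_str
--     color_variant = None
--     for color in COLORS:
--         if theme_str.endswith("-%s" % color):
--             base_name = theme_str[:-len("-%s" % color)]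
--             color_variant = color
--     return base_name, color_variant
-- ===== SOURCE B (Python) =====
-- COLORS = [
--             'Sand',
--             'Beige',
--             'Yellow',
--             'Orange',
--             'Brown',
--             'Red',
--             'Purple',
--             'Pink',
--             'Blue',
--             'Cyan',
--             'Aqua',
--             'Teal',
--             'Green',
--             'White',
--             'Grey',
--             'Black'
--            ]
--
-- _COLOR_SET = frozenset(COLORS)
--
-- def parse(theme_str):
--     # scan from the right; the segment after the LAST hyphen is the only
--     # candidate colour suffix, tested once against the colour set
--     acc = []
--     for ch in reversed(theme_str):
--         if ch == '-':
--             tail = ''.join(reversed(acc))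
--             if tail in _COLOR_SET:
--                 return theme_str[:-len(tail) - 1], tail
--             return theme_str, None
--         acc.append(ch)
--     return theme_str, None
-- ===== Notes on version B (the rewrite author's own statement) =====
-- stated objective: alternative
-- what changed: Replaces the 16-iteration endswith scan over COLORS by a single right-to-left scan that isolates the segment after the last hyphen and does one set-membership test on it.
import Mathlib
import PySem

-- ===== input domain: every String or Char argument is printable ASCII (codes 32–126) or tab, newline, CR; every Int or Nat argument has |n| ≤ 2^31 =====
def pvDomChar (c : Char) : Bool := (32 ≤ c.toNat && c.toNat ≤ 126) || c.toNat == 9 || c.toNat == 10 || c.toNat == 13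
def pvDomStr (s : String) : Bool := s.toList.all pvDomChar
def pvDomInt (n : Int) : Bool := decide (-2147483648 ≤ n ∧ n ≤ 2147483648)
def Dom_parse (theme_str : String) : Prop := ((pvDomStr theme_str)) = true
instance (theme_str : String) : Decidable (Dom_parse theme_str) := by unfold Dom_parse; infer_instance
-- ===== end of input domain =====

-- B replaces A's 16-iteration endswith scan by a single right-to-left scan to the
-- last '-' plus one membership test (objective: alternative/simpler control flow).

-- ===== PORT A =====
def COLORS : List String :=
  ["Sand", "Beige", "Yellow", "Orange", "Brown", "Red", "Purple", "Pink",
   "Blue", "Cyan", "Aqua", "Teal", "Green", "White", "Grey", "Black"]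

def parse (theme_str : String) : String × Option String :=
  COLORS.foldl (fun st color =>
    if PySem.Str.endswith theme_str ("-" ++ color) then
      (PySem.Str.slice theme_str none (some (-(PySem.Str.len ("-" ++ color) : Int))), some color)
    else st) (theme_str, none)

-- ===== PORT B =====
-- loop over reversed(theme_str), accumulating `tail`; stops at the first '-' seen
def parseGo (s : String) : List Char → List Char → String × Option String
  | [], _tail => (s, none)
  | c :: rest, tail =>
    if c = '-' then
      if COLORS.contains (String.ofList tail) then
        (PySem.Str.slice s none (some (-(tail.length : Int) - 1)), some (String.ofList tail))
      else (s, none)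
    else parseGo s rest (c :: tail)

def parse_alt (theme_str : String) : String × Option String :=
  parseGo theme_str theme_str.toList.reverse []

-- ===== PRECONDITION & SPEC =====
def Spec_parse (theme_str : String) (out : String × Option String) : Prop := out = parse_alt theme_str
instance (theme_str : String) (out : String × Option String) : Decidable (Spec_parse theme_str out) := by unfold Spec_parse; infer_instance

-- ===== CLAIM (what is proved, stated in full; the proofs are below) =====
def Claim_equal_parse : Prop := ∀ (theme_str : String), Dom_parse theme_str → Spec_parse theme_str (parse theme_str)

-- ===== LEMMAS AND PROOFS =====

-- decomposition of a list at its LAST '-'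
lemma lastSplit (l : List Char) : '-' ∉ l ∨ ∃ p t, l = p ++ '-' :: t ∧ '-' ∉ t := by
  induction l with
  | nil => left; simp
  | cons c l ih =>
    rcases ih with h | ⟨p, t, rfl, ht⟩
    · by_cases hc : c = '-'
      · right; exact ⟨[], l, by simp [hc], h⟩
      · left
        intro hm
        rcases List.mem_cons.mp hm with h' | h'
        · exact hc h'.symm
        · exact h h'
    · right; exact ⟨c :: p, t, by simp, ht⟩

-- the suffix after the last '-' is the unique hyphen-free '-'-suffix
lemma suffix_unique (p t c : List Char) (ht : '-' ∉ t) (hc : '-' ∉ c) :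
    ('-' :: c) <:+ (p ++ '-' :: t) ↔ c = t := by
  constructor
  · intro h
    have h2 : ('-' :: t) <:+ (p ++ '-' :: t) := ⟨p, rfl⟩
    rcases List.suffix_or_suffix_of_suffix h h2 with h3 | h3
    · rcases List.suffix_cons_iff.mp h3 with h4 | h4
      · exact (List.cons.injEq _ _ _ _ ▸ h4).2
      · exact absurd (h4.mem (by simp)) ht
    · rcases List.suffix_cons_iff.mp h3 with h4 | h4
      · exact ((List.cons.injEq _ _ _ _ ▸ h4).2).symm
      · exact absurd (h4.mem (by simp)) hc
  · rintro rfl; exact ⟨p, rfl⟩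

lemma no_hyphen_no_suffix (l c : List Char) (h : '-' ∉ l) : ¬ ('-' :: c) <:+ l := by
  intro hs; exact h (hs.mem (by simp))

-- A's fold keeps a state v that every matching colour would (re)produce
lemma foldA_keep (s : String) (cs : List String) (v : String × Option String)
    (h : ∀ c ∈ cs, PySem.Str.endswith s ("-" ++ c) = true →
      ((PySem.Str.slice s none (some (-(PySem.Str.len ("-" ++ c) : Int))), some c) : String × Option String) = v) :
    cs.foldl (fun st color =>
      if PySem.Str.endswith s ("-" ++ color) then
        (PySem.Str.slice s none (some (-(PySem.Str.len ("-" ++ color) : Int))), some color)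
      else st) v = v := by
  induction cs with
  | nil => rfl
  | cons c cs ih =>
    simp only [List.foldl_cons]
    by_cases hm : PySem.Str.endswith s ("-" ++ c) = true
    · rw [if_pos hm, h c (by simp) hm]
      exact ih (fun c' hc' => h c' (by simp [hc']))
    · rw [if_neg hm]
      exact ih (fun c' hc' => h c' (by simp [hc']))

-- A's fold reaches the value of the unique matching colour C
lemma foldA_reach (s : String) (cs : List String) (st : String × Option String)
    (C : String) (hC : C ∈ cs) (hm : PySem.Str.endswith s ("-" ++ C) = true)
    (huniq : ∀ c ∈ cs, PySem.Str.endswith s ("-" ++ c) = true → c = C) :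
    cs.foldl (fun st color =>
      if PySem.Str.endswith s ("-" ++ color) then
        (PySem.Str.slice s none (some (-(PySem.Str.len ("-" ++ color) : Int))), some color)
      else st) st
    = (PySem.Str.slice s none (some (-(PySem.Str.len ("-" ++ C) : Int))), some C) := by
  induction cs generalizing st with
  | nil => cases hC
  | cons c cs ih =>
    simp only [List.foldl_cons]
    by_cases hmc : PySem.Str.endswith s ("-" ++ c) = true
    · have hcC : c = C := huniq c (by simp) hmc
      subst hcC
      rw [if_pos hmc]
      exact foldA_keep s cs _ (fun c' hc' hm' => by rw [huniq c' (by simp [hc']) hm'])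
    · rw [if_neg hmc]
      have hC' : C ∈ cs := by
        rcases List.mem_cons.mp hC with rfl | h
        · exact absurd hm hmc
        · exact h
      exact ih st hC' (fun c' hc' hm' => huniq c' (by simp [hc']) hm')

lemma colors_no_hyphen : ∀ c ∈ COLORS, '-' ∉ c.toList := by decide

-- B on a reversed list with no hyphen
lemma parseGo_no_hyphen (s : String) (r tail : List Char) (h : '-' ∉ r) :
    parseGo s r tail = (s, none) := by
  induction r generalizing tail with
  | nil => rfl
  | cons c r ih =>
    have hc : c ≠ '-' := fun hc => h (by simp [hc])
    simp only [parseGo, if_neg hc]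
    exact ih _ (fun hm => h (by simp [hm]))

-- B on a reversed list whose first hyphen splits it as a ++ '-' :: b
lemma parseGo_hyphen (s : String) (a b tail : List Char) (ha : '-' ∉ a) :
    parseGo s (a ++ '-' :: b) tail =
      (if COLORS.contains (String.ofList (a.reverse ++ tail)) then
        (PySem.Str.slice s none (some (-((a.reverse ++ tail).length : Int) - 1)),
         some (String.ofList (a.reverse ++ tail)))
      else (s, none)) := by
  induction a generalizing tail with
  | nil => simp [parseGo]
  | cons c a ih =>
    have hc : c ≠ '-' := fun hc => ha (by simp [hc])
    simp only [List.cons_append, parseGo, if_neg hc]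
    rw [ih (c :: tail) (fun hm => ha (by simp [hm]))]
    simp

-- main equivalence on an arbitrary string
lemma parse_eq_alt (theme_str : String) : parse theme_str = parse_alt theme_str := by
  rcases lastSplit theme_str.toList with h | ⟨p, t, hsplit, ht⟩
  · -- no hyphen at all: both return (s, none)
    have hA : parse theme_str = (theme_str, none) := by
      unfold parse
      exact foldA_keep _ _ _ (fun c hc hm => by
        rw [PySem.Str.endswith_eq] at hm
        have := (PySem.Chars.endswith_iff _ _).mp hm
        simp only [String.toList_append] at this
        exact absurd this (no_hyphen_no_suffix _ _ h))
    have hB : parse_alt theme_str = (theme_str, none) := by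
      unfold parse_alt
      exact parseGo_no_hyphen _ _ _ (by simpa using h)
    rw [hA, hB]
  · -- theme_str.toList = p ++ '-' :: t with '-' ∉ t
    have hrev : theme_str.toList.reverse = t.reverse ++ '-' :: p.reverse := by
      rw [hsplit]; simp
    have hB : parse_alt theme_str =
        (if COLORS.contains (String.ofList t) then
          (PySem.Str.slice theme_str none (some (-(t.length : Int) - 1)), some (String.ofList t))
        else (theme_str, none)) := by
      unfold parse_alt
      rw [hrev, parseGo_hyphen _ _ _ _ (by simpa using ht)]
      simp
    -- endswith characterization
    have hchar : ∀ c : String, '-' ∉ c.toList →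
        (PySem.Str.endswith theme_str ("-" ++ c) = true ↔ c.toList = t) := by
      intro c hcnh
      rw [PySem.Str.endswith_eq, PySem.Chars.endswith_iff]
      simp only [String.toList_append]
      have : ("-" : String).toList = ['-'] := by decide
      rw [this, hsplit]
      simpa using suffix_unique p t c.toList ht hcnh
    by_cases hmem : (String.ofList t) ∈ COLORS
    · have htl : (String.ofList t).toList = t := by simp
      have hmC : PySem.Str.endswith theme_str ("-" ++ String.ofList t) = true :=
        (hchar (String.ofList t) (by rw [htl]; exact ht)).mpr htl
      have hA : parse theme_str =
          (PySem.Str.slice theme_str none (some (-(PySem.Str.len ("-" ++ String.ofList t) : Int))),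
           some (String.ofList t)) := by
        unfold parse
        exact foldA_reach _ _ _ _ hmem hmC (fun c hc hm => by
          have hct : c.toList = t := (hchar c (colors_no_hyphen c hc)).mp hm
          exact String.toList_inj.mp (by simp [hct]))
      rw [hA, hB, if_pos (List.contains_iff_mem.mpr hmem)]
      have hlen : (PySem.Str.len ("-" ++ String.ofList t) : Int) = (t.length : Int) + 1 := by
        rw [PySem.Str.len_append]
        simp [PySem.Str.len_eq]
        omega
      rw [hlen]
      have harg : -(((t.length : Int)) + 1) = -(t.length : Int) - 1 := by ring
      rw [harg]
    · have hA : parse theme_str = (theme_str, none) := by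
        unfold parse
        refine foldA_keep _ _ _ (fun c hc hm => ?_)
        have hct : c.toList = t := (hchar c (colors_no_hyphen c hc)).mp hm
        have hco : c = String.ofList t := String.toList_inj.mp (by simp [hct])
        exact absurd (hco ▸ hc) hmem
      rw [hA, hB, if_neg (by simpa [List.contains_iff_mem] using hmem)]

-- ===== VERDICT (by name: the statement is the Claim_ definition above) =====
theorem parse_spec : Claim_equal_parse := by
  intro theme_str _
  unfold Spec_parse
  exact parse_eq_alt theme_str
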